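-- pv_equiv track=rewrite | github.com/Alan-Gomes1/code-challenges | Torre de Xadrez/main.py | direita
-- ===== SOURCE A (Python) =====
-- def direita(linha, coluna, matriz):
--     qtde = 0
--     if coluna + 1 < 8 and matriz[linha][coluna+1] == 2:
--         return 1
--     elif matriz[linha][coluna+1] == 1:
--         return 0
--     qtde = direita(linha, coluna+1, matriz)
--     return qtde
-- ===== SOURCE B (Python) =====
-- def direita(linha, coluna, matriz):
--     row = matriz[linha]
--     j = next(j for j in range(coluna + 1, len(row))
--              if row[j] == 1 or (row[j] == 2 and j < 8))
--     return 1 if row[j] == 2 else 0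
-- ===== Notes on version B (the rewrite author's own statement) =====
-- stated objective: simpler
-- what changed: Replaced the tail recursion by a direct search: find the first index j > coluna where the row holds 1 or (2 with j < 8) and decide the answer from that single cell, instead of re-entering the function per column.
import Mathlib
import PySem

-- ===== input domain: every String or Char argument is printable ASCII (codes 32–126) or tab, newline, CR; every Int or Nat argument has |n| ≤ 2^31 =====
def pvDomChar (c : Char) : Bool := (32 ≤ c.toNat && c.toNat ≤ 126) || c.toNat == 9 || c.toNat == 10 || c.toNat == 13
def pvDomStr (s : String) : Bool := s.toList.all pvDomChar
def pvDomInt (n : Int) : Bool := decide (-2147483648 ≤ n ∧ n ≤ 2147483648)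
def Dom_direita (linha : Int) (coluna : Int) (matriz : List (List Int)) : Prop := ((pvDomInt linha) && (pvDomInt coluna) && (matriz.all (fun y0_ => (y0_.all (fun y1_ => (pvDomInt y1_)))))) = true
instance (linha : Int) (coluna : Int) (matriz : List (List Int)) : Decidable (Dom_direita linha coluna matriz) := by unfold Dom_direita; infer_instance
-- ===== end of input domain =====

-- B replaces A's tail recursion by a single first-match search over the remaining columns (objective: simpler).

-- ===== PORT A =====
-- Literal port of A's recursion; the `none` branch is Python's IndexError/TypeError, excluded by Pre_.
def direita (linha : Int) (coluna : Int) (matriz : List (List Int)) : Int :=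
  match h : PySem.List.pyGet? ((PySem.List.pyGet? matriz linha).getD []) (coluna + 1) with
  | none => 0
  | some v =>
    if coluna + 1 < 8 ∧ v = 2 then 1
    else if v = 1 then 0
    else direita linha (coluna + 1) matriz
termination_by (((((PySem.List.pyGet? matriz linha).getD []).length : Int)) - coluna).toNat
decreasing_by
  have h2 : PySem.Raise.InRange ((PySem.List.pyGet? matriz linha).getD []).length (coluna + 1) := by
    by_contra hc
    rw [← PySem.List.pyGet?_eq_none_iff] at hc
    simp [hc] at h
  simp [PySem.Raise.InRange] at h2
  omega

-- ===== PORT B =====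
-- pvStop row j : the cell row[j] stops the scan (value 1, or value 2 left of column 8)
def pvStop (row : List Int) (j : Int) : Bool :=
  (PySem.List.pyGet? row j == some 1) || ((PySem.List.pyGet? row j == some 2) && decide (j < 8))

def direita_alt (linha : Int) (coluna : Int) (matriz : List (List Int)) : Int :=
  let row := (PySem.List.pyGet? matriz linha).getD []
  match (PySem.List.pyRange (coluna + 1) (row.length : Int) 1).find? (fun j => pvStop row j) with
  | some j => if PySem.List.pyGet? row j == some 2 then 1 else 0
  | none => 0   -- StopIteration / IndexError in Source B: excluded by Pre_

-- ===== PRECONDITION & SPEC =====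
-- Pre_ admits exactly the inputs on which Python A returns: row matriz[linha] exists, the first
-- probed index coluna+1 is not below -len(row) (else the very first access raises), and some probed
-- cell stops the scan (value 1, or value 2 before column 8); otherwise A runs off the row and raises.
def Pre_direita (linha : Int) (coluna : Int) (matriz : List (List Int)) : Prop :=
  -((((PySem.List.pyGet? matriz linha).getD []).length : Int)) ≤ coluna + 1 ∧
  ∃ j ∈ PySem.List.pyRange (coluna + 1) ((((PySem.List.pyGet? matriz linha).getD []).length : Int)) 1,
      pvStop ((PySem.List.pyGet? matriz linha).getD []) j = true
instance (linha : Int) (coluna : Int) (matriz : List (List Int)) : Decidable (Pre_direita linha coluna matriz) := by unfold Pre_direita; infer_instance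

def pvWitness_direita : Int × Int × List (List Int) := (0, 0, [[0, 1, 0]])

def Spec_direita (linha : Int) (coluna : Int) (matriz : List (List Int)) (out : Int) : Prop := out = direita_alt linha coluna matriz
instance (linha : Int) (coluna : Int) (matriz : List (List Int)) (out : Int) : Decidable (Spec_direita linha coluna matriz out) := by unfold Spec_direita; infer_instance

-- ===== CLAIM (what is proved, stated in full; the proofs are below) =====
def Claim_equal_direita : Prop := ∀ (linha : Int) (coluna : Int) (matriz : List (List Int)), Dom_direita linha coluna matriz → Pre_direita linha coluna matriz → Spec_direita linha coluna matriz (direita linha coluna matriz)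

-- ===== LEMMAS AND PROOFS =====

theorem direita_key : ∀ (n : Nat) (linha coluna : Int) (matriz : List (List Int)),
    ((((((PySem.List.pyGet? matriz linha).getD []).length : Int)) - coluna).toNat = n) →
    Pre_direita linha coluna matriz →
    direita linha coluna matriz = direita_alt linha coluna matriz := by
  intro n
  induction n using Nat.strong_induction_on with
  | _ n ih =>
    intro linha coluna matriz hn hpre
    obtain ⟨hlb, j, hjmem, hjstop⟩ := hpre
    rw [PySem.List.mem_pyRange_one] at hjmem
    set row := (PySem.List.pyGet? matriz linha).getD [] with hrow
    have hclt : coluna + 1 < (row.length : Int) := by omega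
    have hin : PySem.Raise.InRange row.length (coluna + 1) := by
      simp [PySem.Raise.InRange]; omega
    obtain ⟨v, hv⟩ : ∃ v, PySem.List.pyGet? row (coluna + 1) = some v := by
      rcases h : PySem.List.pyGet? row (coluna + 1) with _ | v
      · rw [PySem.List.pyGet?_eq_none_iff] at h; exact absurd hin h
      · exact ⟨v, rfl⟩
    rw [direita]
    rw [direita_alt]
    simp only [← hrow]
    rw [PySem.List.pyRange_one_cons hclt]
    rw [hv]
    show (if coluna + 1 < 8 ∧ v = 2 then (1:Int) else if v = 1 then 0 else direita linha (coluna + 1) matriz) = _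
    by_cases hstop : pvStop row (coluna + 1) = true
    · -- stop at coluna+1 : both sides decide from this cell
      rw [List.find?_cons_of_pos (p := fun j => pvStop row j) hstop]
      simp only [pvStop, hv] at hstop ⊢
      rcases Bool.or_eq_true_iff.mp hstop with h1 | h2
      · have : v = 1 := by simpa using h1
        subst this
        simp
      · have hv2 : v = 2 := by
          have := Bool.and_eq_true_iff.mp h2
          simpa using this.1
        have h8 : coluna + 1 < 8 := by
          have := Bool.and_eq_true_iff.mp h2
          simpa using this.2
        subst hv2
        simp [h8]
    · -- no stop here : A recurses, B skips the head of the range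
      rw [List.find?_cons_of_neg (p := fun j => pvStop row j) (by simpa using hstop)]
      simp only [pvStop, hv] at hstop
      have hvne1 : v ≠ 1 := by
        intro h; subst h; simp at hstop
      have hA : ¬ (coluna + 1 < 8 ∧ v = 2) := by
        rintro ⟨h8, rfl⟩; simp [h8] at hstop
      rw [if_neg hA, if_neg hvne1]
      have hjne : j ≠ coluna + 1 := by
        intro h; subst h
        simp [pvStop, hv] at hjstop hstop
        tauto
      have hpre' : Pre_direita linha (coluna + 1) matriz := by
        refine ⟨by rw [← hrow]; omega, j, ?_, hjstop⟩
        rw [PySem.List.mem_pyRange_one, ← hrow]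
        omega
      have hrec := ih (((row.length : Int) - (coluna + 1)).toNat)
        (by omega) linha (coluna + 1) matriz (by rw [← hrow]) hpre'
      rw [hrec]
      rw [direita_alt]


-- ===== VERDICT (by name: the statement is the Claim_ definition above) =====
theorem direita_spec : Claim_equal_direita := by
  intro linha coluna matriz _ hpre
  unfold Spec_direita
  exact direita_key _ linha coluna matriz rfl hpre
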